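-- pv_equiv track=rewrite | github.com/eliird/bookbot | main.py | char_freq
-- ===== SOURCE A (Python) =====
-- def char_freq(file_content):
--     freq = {}
--
--     for char in file_content.lower():
--         if char not in 'abcdefghijklmnopqrstuvwxyz':
--             continue
--         if char not in freq:
--             freq[char] = 1
--         else:
--             freq[char] += 1
--     return freq
-- ===== SOURCE B (Python) =====
-- def char_freq(file_content):
--     low = file_content.lower()
--     letters = [c for c in dict.fromkeys(low) if c in 'abcdefghijklmnopqrstuvwxyz']
--     return {c: low.count(c) for c in letters}
-- ===== Notes on version B (the rewrite author's own statement) =====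
-- stated objective: faster
-- what changed: A accumulates counts in one pass with per-character Python-level dict updates; B dedups the lowered text into its distinct letters (dict.fromkeys) and builds the dict by counting each such letter with str.count, replacing n dict operations in the interpreter loop by at most 26 C-level scans.
import Mathlib
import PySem

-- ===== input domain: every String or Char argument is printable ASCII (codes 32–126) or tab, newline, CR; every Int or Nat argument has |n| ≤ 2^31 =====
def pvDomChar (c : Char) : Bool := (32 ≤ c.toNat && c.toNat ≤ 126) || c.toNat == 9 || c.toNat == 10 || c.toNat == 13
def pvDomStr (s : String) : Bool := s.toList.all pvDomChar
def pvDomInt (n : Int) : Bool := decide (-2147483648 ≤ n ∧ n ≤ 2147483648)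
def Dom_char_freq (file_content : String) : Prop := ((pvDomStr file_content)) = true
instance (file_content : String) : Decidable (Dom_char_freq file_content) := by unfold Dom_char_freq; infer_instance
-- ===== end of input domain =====

-- B replaces A's single accumulating pass (per-character dict updates) by: dedup the lowered
-- text into its distinct letters, then count each with str.count (measured faster: C-level scans).


-- ===== PORT A =====
def char_freq (file_content : String) : List (String × Int) :=
  ((PySem.Str.lower file_content).toList.foldl
    (fun (freq : PySem.Dict String Int) char =>
      if ¬ (PySem.Str.isIn (String.ofList [char]) "abcdefghijklmnopqrstuvwxyz" = true) then freq
      else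
        match freq.get? (String.ofList [char]) with
        | none => freq.insert (String.ofList [char]) 1
        | some v => freq.insert (String.ofList [char]) (v + 1))
    PySem.Dict.empty).items

-- ===== PORT B =====
def pvLow (file_content : String) : String := PySem.Str.lower file_content

def pvLetters (file_content : String) : List Char :=
  (PySem.List.dedup (pvLow file_content).toList).filter
    (fun c => PySem.Str.isIn (String.ofList [c]) "abcdefghijklmnopqrstuvwxyz")

def char_freq_alt (file_content : String) : List (String × Int) :=
  (PySem.Dict.ofList ((pvLetters file_content).map
    (fun c => (String.ofList [c],
      (PySem.Str.count (pvLow file_content) (String.ofList [c]) : Int))))).items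

-- ===== PRECONDITION & SPEC =====
def Spec_char_freq (file_content : String) (out : List (String × Int)) : Prop := out = char_freq_alt file_content
instance (file_content : String) (out : List (String × Int)) : Decidable (Spec_char_freq file_content out) := by unfold Spec_char_freq; infer_instance

-- ===== CLAIM (what is proved, stated in full; the proofs are below) =====
def Claim_equal_char_freq : Prop := ∀ (file_content : String), Dom_char_freq file_content → Spec_char_freq file_content (char_freq file_content)

-- ===== LEMMAS AND PROOFS =====
theorem pv_key_inj : Function.Injective (fun c : Char => String.ofList [c]) := by
  intro a b h
  have := congrArg String.toList h
  simpa using this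

theorem pv_ofList_append_singleton {α : Type} [BEq α] (l : List α) (c : α) :
    PySem.Set.ofList (l ++ [c]) = PySem.Set.add (PySem.Set.ofList l) c := by
  simp [PySem.Set.ofList, List.foldl_append]

theorem pv_ofList_filter {α : Type} [BEq α] [LawfulBEq α] (p : α → Bool) (l : List α) :
    PySem.Set.ofList (l.filter p) = (PySem.Set.ofList l).filter p := by
  induction l using List.reverseRecOn with
  | nil => rfl
  | append_singleton l c ih =>
      rw [List.filter_append, pv_ofList_append_singleton, PySem.Set.add]
      by_cases hc : c ∈ l
      · have h2 : List.contains (PySem.Set.ofList l) c = true := by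
          simp [PySem.Set.mem_ofList, hc]
        by_cases hp : p c
        · have h1 : List.contains (PySem.Set.ofList (l.filter p)) c = true := by
            simp [PySem.Set.mem_ofList, List.mem_filter, hc, hp]
          simp [h2, hp, hc, pv_ofList_append_singleton, PySem.Set.add, h1, ih]
        · simp [h2, hp, hc, ih]
      · have h2 : List.contains (PySem.Set.ofList l) c = false := by
          simp [PySem.Set.mem_ofList, hc]
        by_cases hp : p c
        · have h1 : List.contains (PySem.Set.ofList (l.filter p)) c = false := by
            simp [PySem.Set.mem_ofList, List.mem_filter, hc]
          simp [h2, hp, hc, pv_ofList_append_singleton, PySem.Set.add, h1, ih, List.filter_append]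
        · simp [h2, hp, hc, ih, List.filter_append]

theorem pv_ofList_map {α β : Type} [BEq α] [LawfulBEq α] [BEq β] [LawfulBEq β]
    (f : α → β) (hf : Function.Injective f) (l : List α) :
    PySem.Set.ofList (l.map f) = (PySem.Set.ofList l).map f := by
  induction l using List.reverseRecOn with
  | nil => rfl
  | append_singleton l c ih =>
      rw [List.map_append, List.map_singleton, pv_ofList_append_singleton,
        pv_ofList_append_singleton, PySem.Set.add, PySem.Set.add]
      by_cases hc : c ∈ l
      · have hm : f c ∈ List.map f l := by
          rw [List.mem_map_of_injective hf]; exact hc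
        have : ∃ a ∈ l, f a = f c := ⟨c, hc, rfl⟩
        simp [hc, hm, ih, this]
      · have hm : f c ∉ List.map f l := by
          rw [List.mem_map_of_injective hf]; exact hc
        simp [hc, hm, ih]
        exact fun x hx he => hc (hf he ▸ hx)

theorem pv_count_go_single (c : Char) (s : List Char) : ∀ (fuel acc : Nat), s.length ≤ fuel →
    PySem.Chars.count.go [c] fuel s acc = acc + s.count c := by
  induction s with
  | nil =>
      intro fuel acc _
      cases fuel <;> simp [PySem.Chars.count.go]
  | cons h t ih =>
      intro fuel acc hle
      cases fuel with
      | zero => simp at hle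
      | succ n =>
          have ht : t.length ≤ n := by simpa using hle
          by_cases hch : c = h
          · have hpre : List.isPrefixOf [c] (h :: t) = true := by simp [List.isPrefixOf, hch]
            rw [PySem.Chars.count.go.eq_def]
            simp only [hpre, if_true, List.length_nil, List.length_cons, List.drop_succ_cons,
              List.drop_zero]
            rw [ih n (acc + 1) ht, List.count_cons]
            have hb : (h == c) = true := by simp [hch]
            rw [hb]
            simp
            omega
          · have hpre : List.isPrefixOf [c] (h :: t) = false := by
              simp [List.isPrefixOf]
              exact fun hx => hch hx
            rw [PySem.Chars.count.go.eq_def]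
            simp only [hpre, Bool.false_eq_true, if_neg (by simp : ¬ False)]
            rw [ih n acc ht, List.count_cons]
            have hb : (h == c) = false := beq_eq_false_iff_ne.mpr (fun hx => hch hx.symm)
            rw [hb]
            simp

theorem pv_count_single (c : Char) (s : List Char) :
    PySem.Chars.count s [c] = s.count c := by
  rw [PySem.Chars.count]
  simp [pv_count_go_single c s s.length 0 le_rfl]

theorem pv_foldA (p : Char → Bool) (key : Char → String) (l : List Char)
    (d : PySem.Dict String Int) :
    l.foldl (fun freq c =>
        if ¬ (p c = true) then freq
        else
          match freq.get? (key c) with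
          | none => freq.insert (key c) 1
          | some v => freq.insert (key c) (v + 1)) d
    = ((l.filter p).map key).foldl (fun d k => d.insert k (d.getD k 0 + 1)) d := by
  induction l generalizing d with
  | nil => rfl
  | cons c t ih =>
      by_cases hp : p c
      · have hstep : (if ¬ (p c = true) then d
            else
              match d.get? (key c) with
              | none => d.insert (key c) 1
              | some v => d.insert (key c) (v + 1))
            = d.insert (key c) (d.getD (key c) 0 + 1) := by
          rw [if_neg (by simp [hp])]
          cases hg : d.get? (key c) with
          | none => rw [PySem.Dict.getD_of_get?_eq_none _ _ hg]; simp
          | some v => rw [PySem.Dict.getD_of_get?_eq_some _ _ hg]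
        rw [List.foldl_cons, hstep, ih, List.filter_cons, if_pos hp, List.map_cons,
          List.foldl_cons]
      · rw [List.foldl_cons, if_pos (show ¬ p c = true from hp), ih, List.filter_cons,
          if_neg hp]


theorem pv_main (fc : String) : char_freq fc = char_freq_alt fc := by
  unfold char_freq char_freq_alt pvLetters pvLow
  set cs := (PySem.Str.lower fc).toList with hcs
  set p : Char → Bool := fun c => PySem.Str.isIn (String.ofList [c]) "abcdefghijklmnopqrstuvwxyz" with hp
  set key : Char → String := fun c => String.ofList [c] with hkey
  rw [pv_foldA p key cs PySem.Dict.empty, PySem.Dict.foldl_insert_getD_add_one_eq_counter,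
    PySem.Dict.items_counter]
  have hletters : ((PySem.List.dedup cs).filter p).Nodup :=
    (PySem.List.dedup_eq_ofList cs ▸ PySem.Set.nodup_ofList cs).filter p
  have hkeys : ((((PySem.List.dedup cs).filter p).map
      (fun c => (key c, (PySem.Str.count (PySem.Str.lower fc) (key c) : Int)))).map Prod.fst).Nodup := by
    rw [List.map_map]
    exact hletters.map (fun a b h => pv_key_inj h)
  have hOf : PySem.Dict.ofList (((PySem.List.dedup cs).filter p).map
      (fun c => (key c, (PySem.Str.count (PySem.Str.lower fc) (key c) : Int))))
      = List.foldl (fun acc q => acc.insert q.1 q.2) PySem.Dict.empty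
        (((PySem.List.dedup cs).filter p).map
          (fun c => (key c, (PySem.Str.count (PySem.Str.lower fc) (key c) : Int)))) := rfl
  rw [hOf, PySem.Dict.items_foldl_insert_fresh _ Prod.fst Prod.snd PySem.Dict.empty
      (fun a _ => PySem.Dict.contains_empty _) hkeys]
  simp only [show PySem.Dict.empty.items = ([] : List (String × Int)) from rfl, List.nil_append, List.map_map]
  rw [pv_ofList_map key pv_key_inj (cs.filter p), pv_ofList_filter p cs,
    PySem.List.dedup_eq_ofList, List.map_map]
  apply List.map_congr_left
  intro c hc
  have hpc : p c = true := (List.mem_filter.mp hc).2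
  simp only [Function.comp]
  have h1 : List.count (key c) (List.map key (List.filter p cs)) = List.count c (List.filter p cs) :=
    List.count_map_of_injective _ key pv_key_inj c
  have h2 : List.count c (List.filter p cs) = List.count c cs := List.count_filter hpc
  have h3 : PySem.Str.count (PySem.Str.lower fc) (key c) = List.count c cs := by
    rw [PySem.Str.count_eq]
    have hk : (key c).toList = [c] := by simp [hkey]
    rw [hk, ← hcs, pv_count_single]
  rw [h1, h2, h3]

-- ===== VERDICT (by name: the statement is the Claim_ definition above) =====
theorem char_freq_spec : Claim_equal_char_freq := fun fc _ => pv_main fc
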